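-- pv_equiv track=rewrite | github.com/kevin-a-nelson/Foundations-of-AI | HW1/question2.py | getFCosts
-- ===== SOURCE A (Python) =====
-- def getGCosts(nodes):
--     startNode = getStartNode(nodes)
--
--     hueristicValues = []
--     for rowIdx, row in enumerate(nodes):
--         rowValues = []
--         for colIdx, _ in enumerate(row):
--             rowDiff = abs(rowIdx - startNode[0])
--             colDiff = abs(colIdx - startNode[1])
--             rowValues.append(rowDiff + colDiff)
--         hueristicValues.append(rowValues)
--     return hueristicValues
--
-- def getFCosts(nodes):
--     HCosts = getHCosts(nodes)
--     GCosts = getGCosts(nodes)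
--     FCosts = []
--
--     for rowIdx, row in enumerate(nodes):
--         FCostRow = []
--         for colIdx, _ in enumerate(row):
--             HCost = HCosts[rowIdx][colIdx]
--             GCost = GCosts[rowIdx][colIdx]
--             FCostRow.append(HCost + GCost)
--         FCosts.append(FCostRow)
--     return FCosts
--
-- def getHCosts(nodes):
--     endNode = getEndNode(nodes)
--
--     hueristicValues = []
--     for rowIdx, row in enumerate(nodes):
--         rowValues = []
--         for colIdx, _ in enumerate(row):
--             rowDiff = abs(rowIdx - endNode[0])
--             colDiff = abs(colIdx - endNode[1])
--             rowValues.append(rowDiff + colDiff)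
--         hueristicValues.append(rowValues)
--     return hueristicValues
--
-- def getStartNode(nodes):
--     for rowIdx, row in enumerate(nodes):
--         for colIdx, _ in enumerate(row):
--             if nodes[rowIdx][colIdx] == START:
--                 return [rowIdx, colIdx]
--
-- def getEndNode(nodes):
--     for rowIdx, row in enumerate(nodes):
--         for colIdx, _ in enumerate(row):
--             if nodes[rowIdx][colIdx] == END:
--                 return [rowIdx, colIdx]
--
-- START = "ST "
--
-- END = "EN "
-- ===== SOURCE B (Python) =====
-- START = "ST "
--
-- END = "EN "
--
--
-- def _findCell(nodes, target):
--     r = 0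
--     for row in nodes:
--         c = 0
--         for cell in row:
--             if cell == target:
--                 return (r, c)
--             c += 1
--         r += 1
--     return None
--
--
-- def getFCosts(nodes):
--     startNode = _findCell(nodes, START)
--     endNode = _findCell(nodes, END)
--     return [
--         [
--             abs(r - startNode[0]) + abs(c - startNode[1])
--             + abs(r - endNode[0]) + abs(c - endNode[1])
--             for c, _ in enumerate(row)
--         ]
--         for r, row in enumerate(nodes)
--     ]
-- ===== Notes on version B (the rewrite author's own statement) =====
-- stated objective: simpler
-- what changed: B finds the start and end cells once and fills the grid directly with abs(r-s0)+abs(c-s1)+abs(r-e0)+abs(c-e1) in one nested comprehension, instead of materializing the HCosts and GCosts grids and re-indexing them in a third pass.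
import Mathlib
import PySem

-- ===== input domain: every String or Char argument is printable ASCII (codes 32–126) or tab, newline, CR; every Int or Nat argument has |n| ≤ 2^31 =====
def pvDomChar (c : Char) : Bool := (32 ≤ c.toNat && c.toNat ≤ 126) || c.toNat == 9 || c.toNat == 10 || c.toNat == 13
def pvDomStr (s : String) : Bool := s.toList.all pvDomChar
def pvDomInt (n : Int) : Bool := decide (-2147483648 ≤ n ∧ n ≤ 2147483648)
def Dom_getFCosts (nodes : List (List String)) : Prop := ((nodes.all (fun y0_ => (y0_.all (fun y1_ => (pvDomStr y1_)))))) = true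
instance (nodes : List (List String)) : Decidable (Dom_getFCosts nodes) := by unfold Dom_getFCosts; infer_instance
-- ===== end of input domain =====

-- B finds the start and end cells once and fills the grid in one nested pass with the
-- direct |r-s0|+|c-s1|+|r-e0|+|c-e1| formula, instead of A's three passes building and
-- re-indexing separate HCosts/GCosts grids (objective: simpler).


-- ===== PORT A =====
def pySTART : String := "ST "
def pyEND : String := "EN "

-- inner loop of getStartNode/getEndNode; Python tests nodes[rowIdx][colIdx] == target, and
-- with both indices coming from enumerate that lookup is exactly the enumerated cell
def scanRowA (target : String) (ri : Int) : List (Int × String) → Option (Int × Int)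
  | [] => none
  | (ci, cell) :: rest => if cell == target then some (ri, ci) else scanRowA target ri rest

def scanGridA (target : String) : List (Int × List String) → Option (Int × Int)
  | [] => none
  | (ri, row) :: rest =>
    match scanRowA target ri (PySem.List.enumerate row 0) with
    | some p => some p
    | none => scanGridA target rest

def getStartNode (nodes : List (List String)) : Option (Int × Int) :=
  scanGridA pySTART (PySem.List.enumerate nodes 0)

def getEndNode (nodes : List (List String)) : Option (Int × Int) :=
  scanGridA pyEND (PySem.List.enumerate nodes 0)

-- Python raises TypeError on startNode[0] when getStartNode returned None; that case is
-- outside Pre_getFCosts, here it yields []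
def getGCosts (nodes : List (List String)) : List (List Int) :=
  match getStartNode nodes with
  | none => []
  | some s =>
    (PySem.List.enumerate nodes 0).map (fun p =>
      (PySem.List.enumerate p.2 0).map (fun q => |p.1 - s.1| + |q.1 - s.2|))

def getHCosts (nodes : List (List String)) : List (List Int) :=
  match getEndNode nodes with
  | none => []
  | some e =>
    (PySem.List.enumerate nodes 0).map (fun p =>
      (PySem.List.enumerate p.2 0).map (fun q => |p.1 - e.1| + |q.1 - e.2|))

def getFCosts (nodes : List (List String)) : List (List Int) :=
  let HCosts := getHCosts nodes
  let GCosts := getGCosts nodes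
  (PySem.List.enumerate nodes 0).map (fun p =>
    (PySem.List.enumerate p.2 0).map (fun q =>
      PySem.List.pyGetD (PySem.List.pyGetD HCosts p.1 []) q.1 0 +
      PySem.List.pyGetD (PySem.List.pyGetD GCosts p.1 []) q.1 0))

-- ===== PORT B =====
-- B's _findCell: explicit row/column counters, no enumerate
def findInRowB (target : String) (r : Int) (c : Int) : List String → Option (Int × Int)
  | [] => none
  | cell :: rest => if cell == target then some (r, c) else findInRowB target r (c + 1) rest

def findCellB (target : String) (r : Int) : List (List String) → Option (Int × Int)
  | [] => none
  | row :: rest =>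
    match findInRowB target r 0 row with
    | some p => some p
    | none => findCellB target (r + 1) rest

-- the comprehension subscripts startNode/endNode once per CELL, so a missing marker only
-- raises TypeError when some row is nonempty; the per-cell match mirrors that (its
-- `| _, _ => 0` arm is Python's TypeError, reachable only outside Pre_getFCosts)
def getFCosts_alt (nodes : List (List String)) : List (List Int) :=
  let s? := findCellB pySTART 0 nodes
  let e? := findCellB pyEND 0 nodes
  (PySem.List.enumerate nodes 0).map (fun p =>
    (PySem.List.enumerate p.2 0).map (fun q =>
      match s?, e? with
      | some s, some e => |p.1 - s.1| + |q.1 - s.2| + |p.1 - e.1| + |q.1 - e.2|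
      | _, _ => 0))

-- ===== PRECONDITION & SPEC =====
-- Pre_ excludes exactly the grids on which A raises TypeError: some row is nonempty (so a
-- cost cell is actually computed) yet a "ST " or "EN " cell is missing, so the search
-- returned None and A subscripts it.
def Pre_getFCosts (nodes : List (List String)) : Prop :=
  nodes.all (fun row => row.isEmpty) = true ∨
  (nodes.any (fun row => row.any (fun c => c == pySTART)) = true ∧
   nodes.any (fun row => row.any (fun c => c == pyEND)) = true)

instance (nodes : List (List String)) : Decidable (Pre_getFCosts nodes) := by
  unfold Pre_getFCosts; infer_instance

def pvWitness_getFCosts : List (List String) := [["x", "ST "], ["EN "]]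

def Spec_getFCosts (nodes : List (List String)) (out : List (List Int)) : Prop := out = getFCosts_alt nodes
instance (nodes : List (List String)) (out : List (List Int)) : Decidable (Spec_getFCosts nodes out) := by unfold Spec_getFCosts; infer_instance

-- ===== CLAIM (what is proved, stated in full; the proofs are below) =====
def Claim_equal_getFCosts : Prop := ∀ (nodes : List (List String)), Dom_getFCosts nodes → Pre_getFCosts nodes → Spec_getFCosts nodes (getFCosts nodes)

-- ===== LEMMAS AND PROOFS =====

-- B's counter-based search equals A's enumerate-based search
theorem findInRowB_eq (target : String) (ri : Int) (row : List String) :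
    ∀ c : Int, findInRowB target ri c row = scanRowA target ri (PySem.List.enumerate row c) := by
  induction row with
  | nil => intro c; simp [findInRowB, PySem.List.enumerate_nil, scanRowA]
  | cons x xs ih =>
    intro c
    rw [PySem.List.enumerate_cons]
    simp only [findInRowB, scanRowA]
    split <;> simp [ih]

theorem findCellB_eq (target : String) (rows : List (List String)) :
    ∀ r : Int, findCellB target r rows = scanGridA target (PySem.List.enumerate rows r) := by
  induction rows with
  | nil => intro r; simp [findCellB, PySem.List.enumerate_nil, scanGridA]
  | cons x xs ih =>
    intro r
    rw [PySem.List.enumerate_cons]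
    simp only [findCellB, scanGridA, findInRowB_eq]
    split <;> simp [ih]

theorem scanRowA_isSome (target : String) (ri : Int) (row : List String) :
    ∀ c : Int, (scanRowA target ri (PySem.List.enumerate row c)).isSome
      = row.any (fun x => x == target) := by
  induction row with
  | nil => intro c; simp [PySem.List.enumerate_nil, scanRowA]
  | cons x xs ih =>
    intro c
    rw [PySem.List.enumerate_cons]
    simp only [scanRowA, List.any_cons]
    split <;> simp_all

theorem scanGridA_isSome (target : String) (rows : List (List String)) :
    ∀ r : Int, (scanGridA target (PySem.List.enumerate rows r)).isSome
      = rows.any (fun row => row.any (fun x => x == target)) := by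
  induction rows with
  | nil => intro r; simp [PySem.List.enumerate_nil, scanGridA]
  | cons x xs ih =>
    intro r
    rw [PySem.List.enumerate_cons]
    simp only [scanGridA, List.any_cons]
    rcases h : scanRowA target r (PySem.List.enumerate x 0) with _ | p
    · have := scanRowA_isSome target r x 0
      rw [h] at this
      simp_all
      intro hmem
      exact absurd rfl (this target hmem)
    · have := scanRowA_isSome target r x 0
      rw [h] at this
      simp_all

-- indexing A's intermediate grid at its own enumerate indices returns the formula value
theorem grid_lookup (nodes : List (List String)) (g : Int → Int → Int)
    (k j : Nat) (hk : k < nodes.length) (hj : j < nodes[k].length) :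
    PySem.List.pyGetD
      (PySem.List.pyGetD
        ((PySem.List.enumerate nodes 0).map (fun p =>
          (PySem.List.enumerate p.2 0).map (fun q => g p.1 q.1))) (k : Int) [])
      (j : Int) 0 = g (k : Int) (j : Int) := by
  have hrow : PySem.List.pyGetD
      ((PySem.List.enumerate nodes 0).map (fun p =>
        (PySem.List.enumerate p.2 0).map (fun q => g p.1 q.1))) (k : Int) []
      = (PySem.List.enumerate nodes[k] 0).map (fun q => g (k : Int) q.1) := by
    rw [PySem.List.pyGetD_natCast,
        List.getD_eq_getElem _ _ (by simpa [PySem.List.length_enumerate] using hk)]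
    simp [PySem.List.getElem_enumerate]
  rw [hrow, PySem.List.pyGetD_natCast,
      List.getD_eq_getElem _ _ (by simpa [PySem.List.length_enumerate] using hj)]
  simp [PySem.List.getElem_enumerate]

-- ===== VERDICT (by name: the statement is the Claim_ definition above) =====
theorem getFCosts_spec : Claim_equal_getFCosts := by
  intro nodes _ hpre
  unfold Spec_getFCosts
  rcases hpre with hemp | ⟨hS, hE⟩
  · -- every row is empty: every inner map runs over enumerate [] on both sides
    rw [getFCosts, getFCosts_alt]
    apply List.map_congr_left
    intro p hp
    obtain ⟨k, hk, rfl⟩ := (PySem.List.mem_enumerate_iff nodes 0 p).mp hp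
    have : nodes[k] = [] := by
      have := List.all_eq_true.mp hemp nodes[k] (List.getElem_mem hk)
      simpa [List.isEmpty_iff] using this
    simp [this, PySem.List.enumerate_nil]
  · have hs : (getStartNode nodes).isSome := by
      rw [getStartNode, scanGridA_isSome]; exact hS
    have he : (getEndNode nodes).isSome := by
      rw [getEndNode, scanGridA_isSome]; exact hE
    obtain ⟨s, hs⟩ := Option.isSome_iff_exists.mp hs
    obtain ⟨e, he⟩ := Option.isSome_iff_exists.mp he
    rw [getFCosts_alt, findCellB_eq, findCellB_eq]
    rw [show scanGridA pySTART (PySem.List.enumerate nodes 0) = some s from hs]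
    rw [show scanGridA pyEND (PySem.List.enumerate nodes 0) = some e from he]
    rw [getFCosts, getHCosts, getGCosts, hs, he]
    simp only []
    apply List.map_congr_left
    intro p hp
    obtain ⟨k, hk, rfl⟩ := (PySem.List.mem_enumerate_iff nodes 0 p).mp hp
    apply List.map_congr_left
    intro q hq
    obtain ⟨j, hj, rfl⟩ := (PySem.List.mem_enumerate_iff _ _ q).mp hq
    simp only [zero_add]
    rw [grid_lookup nodes (fun a b => |a - e.1| + |b - e.2|) k j hk hj,
        grid_lookup nodes (fun a b => |a - s.1| + |b - s.2|) k j hk hj]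
    ring
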